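-- pv_equiv track=rewrite | github.com/rhatos/IBPE | backend/bpe/BPETesting.py | find_combination
-- ===== SOURCE A (Python) =====
-- def find_combination(combinations, vocabulary):
--     """Find the longest combination of consecutive letters that exists in the vocabulary for a word"""
--     max_length = 0
--     largest_combinations = []
--
--     # iterate through the word character by character
--     for combination in combinations:
--         current_sequence = combination[0]
--         # check if the current sequence exists in the vocabulary
--         if current_sequence in vocabulary:
--             if len(current_sequence) > max_length:
--                 # update largest combination if the current sequence is longer than the current largest combination
--                 max_length = len(current_sequence)
--                 largest_combinations.clear()
--                 largest_combinations.append(combination)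
--             elif len(current_sequence) == max_length:
--                 largest_combinations.append(combination)
--     # return the largest combination of consecutive letters that exists in the vocabulary
--
--     return largest_combinations
-- ===== SOURCE B (Python) =====
-- def find_combination(combinations, vocabulary):
--     """Find the longest combination of consecutive letters that exists in the vocabulary for a word"""
--     max_length = max((len(c[0]) for c in combinations if c[0] in vocabulary), default=0)
--     return [c for c in combinations
--             if c[0] in vocabulary and len(c[0]) == max_length]
-- ===== Notes on version B (the rewrite author's own statement) =====
-- stated objective: simpler
-- what changed: Replaced A's one-pass accumulator with clear-on-new-max by a two-pass compute-max-then-filter: first the winning length via max(..., default=0), then one filtering comprehension that keeps ties in input order.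
import Mathlib
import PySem

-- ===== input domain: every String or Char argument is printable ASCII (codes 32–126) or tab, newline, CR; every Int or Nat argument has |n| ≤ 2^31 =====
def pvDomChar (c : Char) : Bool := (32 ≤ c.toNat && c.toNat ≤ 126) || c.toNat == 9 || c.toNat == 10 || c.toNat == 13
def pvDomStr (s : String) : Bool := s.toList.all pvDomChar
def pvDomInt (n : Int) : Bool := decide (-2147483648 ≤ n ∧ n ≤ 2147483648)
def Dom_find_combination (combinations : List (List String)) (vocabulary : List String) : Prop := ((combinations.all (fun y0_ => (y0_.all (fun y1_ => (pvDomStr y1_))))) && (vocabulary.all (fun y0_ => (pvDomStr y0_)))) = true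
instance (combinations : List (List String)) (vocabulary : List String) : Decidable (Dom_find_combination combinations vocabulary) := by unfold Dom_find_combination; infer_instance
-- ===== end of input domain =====

-- B replaces A's one-pass accumulator-with-clear by a two-pass compute-max-then-filter (objective: simpler).


-- ===== PORT A =====
def find_combination (combinations : List (List String)) (vocabulary : List String) : List (List String) :=
  (combinations.foldl
    (fun (st : Nat × List (List String)) combination =>
      match PySem.List.pyGet? combination 0 with
      | none => st   -- Python raises IndexError here; excluded by Pre_find_combination
      | some current_sequence =>
        if vocabulary.contains current_sequence then
          if current_sequence.length > st.1 then
            (current_sequence.length, [combination])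
          else if current_sequence.length == st.1 then
            (st.1, st.2 ++ [combination])
          else st
        else st)
    (0, [])).2

-- ===== PORT B =====
-- c[0], total via getD (the raising case lies outside Pre_find_combination)
def pvHd (c : List String) : String := (PySem.List.pyGet? c 0).getD ""

def find_combination_alt (combinations : List (List String)) (vocabulary : List String) : List (List String) :=
  let max_length :=
    (((combinations.filter (fun c => vocabulary.contains (pvHd c))).map
        (fun c => (pvHd c).length)).foldl Nat.max 0)
  combinations.filter (fun c => vocabulary.contains (pvHd c) && (pvHd c).length == max_length)

-- ===== PRECONDITION & SPEC =====
-- Pre_ excludes combinations containing an empty inner list: Python A raises IndexError on combination[0] there.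
def Pre_find_combination (combinations : List (List String)) (vocabulary : List String) : Prop :=
  ∀ c ∈ combinations, c ≠ []
instance (combinations : List (List String)) (vocabulary : List String) : Decidable (Pre_find_combination combinations vocabulary) := by unfold Pre_find_combination; infer_instance

def pvWitness_find_combination : List (List String) × List String := ([["ab"], ["a", "x"]], ["a", "ab"])

def Spec_find_combination (combinations : List (List String)) (vocabulary : List String) (out : List (List String)) : Prop := out = find_combination_alt combinations vocabulary
instance (combinations : List (List String)) (vocabulary : List String) (out : List (List String)) : Decidable (Spec_find_combination combinations vocabulary out) := by unfold Spec_find_combination; infer_instance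

-- ===== CLAIM (what is proved, stated in full; the proofs are below) =====
def Claim_equal_find_combination : Prop := ∀ (combinations : List (List String)) (vocabulary : List String), Dom_find_combination combinations vocabulary → Pre_find_combination combinations vocabulary → Spec_find_combination combinations vocabulary (find_combination combinations vocabulary)

-- ===== LEMMAS AND PROOFS =====

-- running max of the valid head-lengths, seeded with m (A's max_length)
def pvM (vocabulary : List String) (cs : List (List String)) (m : Nat) : Nat :=
  cs.foldl (fun m c => if vocabulary.contains (pvHd c) then Nat.max m (pvHd c).length else m) m

-- the valid entries of head-length k, in input order
def pvF (vocabulary : List String) (cs : List (List String)) (k : Nat) : List (List String) :=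
  cs.filter (fun c => vocabulary.contains (pvHd c) && (pvHd c).length == k)

theorem pvM_ge (vocabulary : List String) (cs : List (List String)) (m : Nat) :
    m ≤ pvM vocabulary cs m := by
  induction cs generalizing m with
  | nil => simp [pvM]
  | cons c cs ih =>
    simp only [pvM, List.foldl_cons]
    split
    · exact le_trans (Nat.le_max_left _ _) (ih _)
    · exact ih m

theorem pvHd_cons (x : String) (t : List String) : pvHd (x :: t) = x := by
  simp [pvHd, PySem.List.pyGet?, PySem.List.pyIdx?]

theorem loopA_eq (vocabulary : List String) (cs : List (List String))
    (h : ∀ c ∈ cs, c ≠ []) (m : Nat) (acc : List (List String)) :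
    cs.foldl
      (fun (st : Nat × List (List String)) combination =>
        match PySem.List.pyGet? combination 0 with
        | none => st
        | some current_sequence =>
          if vocabulary.contains current_sequence then
            if current_sequence.length > st.1 then
              (current_sequence.length, [combination])
            else if current_sequence.length == st.1 then
              (st.1, st.2 ++ [combination])
            else st
          else st)
      (m, acc)
    = (pvM vocabulary cs m,
       if pvM vocabulary cs m = m then acc ++ pvF vocabulary cs m
       else pvF vocabulary cs (pvM vocabulary cs m)) := by
  induction cs generalizing m acc with
  | nil => simp [pvM, pvF]
  | cons c cs ih =>
    obtain ⟨x, t, rfl⟩ : ∃ x t, c = x :: t := by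
      cases c with
      | nil => exact absurd rfl (h _ (List.mem_cons_self))
      | cons x t => exact ⟨x, t, rfl⟩
    have hget : PySem.List.pyGet? (x :: t) (0 : Int) = some x := by
      simp [PySem.List.pyGet?, PySem.List.pyIdx?]
    have hhd : pvHd (x :: t) = x := pvHd_cons x t
    have htail : ∀ c ∈ cs, c ≠ [] := fun c hc => h c (List.mem_cons_of_mem _ hc)
    by_cases hv : vocabulary.contains x
    · have hv' : x ∈ vocabulary := by simpa using hv
      by_cases hgt : x.length > m
      · -- new strict max: state cleared to [x::t]
        simp only [List.foldl_cons, hget, hv, if_pos hgt]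
        rw [ih htail]
        have hM : pvM vocabulary ((x :: t) :: cs) m = pvM vocabulary cs x.length := by
          simp [pvM, hhd, hv, hv', Nat.max_eq_right (Nat.le_of_lt hgt)]
        have hMge : x.length ≤ pvM vocabulary cs x.length := pvM_ge _ _ _
        have hMne : pvM vocabulary cs x.length ≠ m := by omega
        rw [hM]
        by_cases heq : pvM vocabulary cs x.length = x.length
        · simp [heq, hMne, pvF, hhd, hv, hv']
          exact fun hxm => absurd hxm (by omega)
        · have hlt : x.length < pvM vocabulary cs x.length := lt_of_le_of_ne hMge (Ne.symm heq)
          have : (x.length == pvM vocabulary cs x.length) = false := by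
            simp; omega
          simp [heq, hMne, pvF, hhd, hv, hv', this]
      · by_cases heq : x.length = m
        · -- tie: append
          simp only [List.foldl_cons, hget, hv, if_neg hgt, heq, BEq.rfl, if_pos]
          rw [ih htail]
          have hM : pvM vocabulary ((x :: t) :: cs) m = pvM vocabulary cs m := by
            simp [pvM, hhd, hv, hv', heq]
          rw [hM]
          by_cases hMm : pvM vocabulary cs m = m
          · simp [hMm, pvF, hhd, hv, hv', heq]
          · have : m < pvM vocabulary cs m := lt_of_le_of_ne (pvM_ge _ _ _) (Ne.symm hMm)
            have hne : (x.length == pvM vocabulary cs m) = false := by simp; omega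
            simp [hMm, pvF, hhd, hv, hv', hne]
        · -- shorter valid entry: skipped
          have hne : (x.length == m) = false := by simp [heq]
          simp only [List.foldl_cons, hget, hv, if_neg hgt, hne, Bool.false_eq_true, if_neg,
            if_false]
          rw [ih htail]
          have hlt : x.length < m := by omega
          have hM : pvM vocabulary ((x :: t) :: cs) m = pvM vocabulary cs m := by
            simp [pvM, hhd, hv, hv', Nat.max_eq_left (Nat.le_of_lt hlt)]
          rw [hM]
          by_cases hMm : pvM vocabulary cs m = m
          · have : (x.length == m) = false := hne
            simp [hMm, pvF, hhd, hv, hv', this]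
          · have : m < pvM vocabulary cs m := lt_of_le_of_ne (pvM_ge _ _ _) (Ne.symm hMm)
            have h2 : (x.length == pvM vocabulary cs m) = false := by simp; omega
            simp [hMm, pvF, hhd, hv, hv', h2]
    · -- invalid: skipped everywhere
      have hv' : x ∉ vocabulary := by simpa using hv
      simp only [List.foldl_cons, hget, hv, Bool.false_eq_true, if_false]
      rw [ih htail]
      have hM : pvM vocabulary ((x :: t) :: cs) m = pvM vocabulary cs m := by
        simp [pvM, hhd, hv, hv']
      have hF : ∀ k, pvF vocabulary ((x :: t) :: cs) k = pvF vocabulary cs k := by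
        intro k; simp [pvF, hhd, hv, hv']
      rw [hM, hF, hF]

theorem maxB_eq (vocabulary : List String) (cs : List (List String)) (m : Nat) :
    ((cs.filter (fun c => vocabulary.contains (pvHd c))).map
        (fun c => (pvHd c).length)).foldl Nat.max m = pvM vocabulary cs m := by
  induction cs generalizing m with
  | nil => simp [pvM]
  | cons c cs ih =>
    by_cases hv : vocabulary.contains (pvHd c)
    · simp only [pvM, List.filter_cons, hv, if_pos, List.foldl_cons, List.map_cons]
      rw [ih]; rfl
    · simp only [pvM, List.filter_cons, hv, Bool.false_eq_true, if_false, List.foldl_cons]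
      rw [ih]; simp [pvM, hv]

-- ===== VERDICT (by name: the statement is the Claim_ definition above) =====
theorem find_combination_spec : Claim_equal_find_combination := by
  intro combinations vocabulary _ hpre
  unfold Spec_find_combination find_combination find_combination_alt
  rw [loopA_eq vocabulary combinations hpre 0 []]
  rw [maxB_eq]
  by_cases h0 : pvM vocabulary combinations 0 = 0
  · simp [h0, pvF]
  · simp [h0, pvF]
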